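-- pv_equiv track=rewrite | github.com/DUCCANH12/tt.py | bot.py | adjust_line_spacing
-- ===== SOURCE A (Python) =====
-- def adjust_line_spacing(text, mode="thu"):
--     try:
--         lines = text.split('\n')
--         result = []
--         if mode == "thu":
--             result = [l for l in lines if l.strip()]
--         elif mode == "cach":
--             for i, line in enumerate(lines):
--                 line_stripped = line.strip()
--                 if not line_stripped:
--                     result.append(line)
--                     continue
--                 if line_stripped == ".":
--                     if result and result[-1].strip() != "": result.extend(["", ""])
--                     result.append(line)
--                 else:
--                     result.append(line)
--                     if (i < len(lines) - 1 and lines[i + 1].strip() != "" and lines[i + 1].strip() != "."):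
--                         result.append("")
--         return '\n'.join(result)
--     except: return text
-- ===== SOURCE B (Python) =====
-- def adjust_line_spacing(text, mode="thu"):
--     try:
--         lines = text.split('\n')
--         if mode == "thu":
--             return '\n'.join(l for l in lines if l.strip())
--         if mode != "cach":
--             return ''
--         out = []
--         prev = None  # stripped value of the previous input line, None before the first
--         for line in lines:
--             s = line.strip()
--             if s and s != "." and prev not in (None, "", "."):
--                 out.append("")
--             if s == "." and out and out[-1].strip():
--                 out.extend(["", ""])
--             out.append(line)
--             prev = s
--         return '\n'.join(out)
--     except:
--         return text
-- ===== Notes on version B (the rewrite author's own statement) =====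
-- stated objective: alternative
-- what changed: The 'cach' pass is rewritten as a lookbehind state machine that carries the previous line's stripped value and inserts the blank separator before a content line, instead of A's enumerate loop that peeks ahead at lines[i+1] and appends the blank after the current line.
import Mathlib
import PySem

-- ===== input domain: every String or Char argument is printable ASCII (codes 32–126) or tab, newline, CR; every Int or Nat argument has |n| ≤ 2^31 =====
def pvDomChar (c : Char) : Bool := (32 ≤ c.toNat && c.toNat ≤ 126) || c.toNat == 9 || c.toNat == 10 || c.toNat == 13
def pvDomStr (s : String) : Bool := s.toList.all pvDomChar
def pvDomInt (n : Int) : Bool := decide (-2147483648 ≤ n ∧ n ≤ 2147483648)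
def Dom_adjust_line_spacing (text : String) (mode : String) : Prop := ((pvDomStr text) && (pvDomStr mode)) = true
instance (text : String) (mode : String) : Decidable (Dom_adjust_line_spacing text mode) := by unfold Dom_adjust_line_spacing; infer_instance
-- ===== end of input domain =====

-- B replaces A's lookahead at lines[i+1] by a lookbehind state machine over the previous
-- stripped line (objective: alternative decomposition, same cost).

-- ===== PORT A =====
-- A's 'cach' loop: enumerate with a peek at lines[i+1]; ported as structural recursion
-- carrying the tail, whose head is exactly lines[i+1].
def pvA_cach (acc : List String) : List String → List String
  | [] => acc
  | line :: rest =>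
    let s := PySem.Str.strip line
    if s = "" then
      pvA_cach (acc ++ [line]) rest
    else if s = "." then
      let acc' := if acc ≠ [] ∧ PySem.Str.strip (acc.getLast?.getD "") ≠ "" then acc ++ ["", ""] else acc
      pvA_cach (acc' ++ [line]) rest
    else
      let acc' := acc ++ [line]
      let acc'' := match rest with
        | nxt :: _ =>
          if PySem.Str.strip nxt ≠ "" ∧ PySem.Str.strip nxt ≠ "." then acc' ++ [""] else acc'
        | [] => acc'
      pvA_cach acc'' rest

def adjust_line_spacing (text : String) (mode : String) : String :=
  let lines := (PySem.Str.split? text "\n").getD []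
  if mode = "thu" then
    PySem.Str.join "\n" (lines.filter (fun l => PySem.Str.strip l ≠ ""))
  else if mode = "cach" then
    PySem.Str.join "\n" (pvA_cach [] lines)
  else
    PySem.Str.join "\n" []

-- ===== PORT B =====
-- B's 'cach' loop: a fold whose state is (output so far, stripped previous input line).
-- pvPrevContent ports Source B's  'prev not in (None, "", ".")'.
def pvPrevContent : Option String → Bool
  | some p => p != "" && p != "."
  | none => false

def pvB_step (st : List String × Option String) (line : String) : List String × Option String :=
  let s := PySem.Str.strip line
  let out₁ := if s ≠ "" ∧ s ≠ "." ∧ pvPrevContent st.2 then st.1 ++ [""] else st.1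
  let out₂ := if s = "." ∧ out₁ ≠ [] ∧ PySem.Str.strip (out₁.getLast?.getD "") ≠ "" then
      out₁ ++ ["", ""] else out₁
  (out₂ ++ [line], some s)

def adjust_line_spacing_alt (text : String) (mode : String) : String :=
  let lines := (PySem.Str.split? text "\n").getD []
  if mode = "thu" then
    PySem.Str.join "\n" (lines.filter (fun l => PySem.Str.strip l ≠ ""))
  else if mode = "cach" then
    PySem.Str.join "\n" ((lines.foldl pvB_step ([], none)).1)
  else
    ""

-- ===== PRECONDITION & SPEC =====
def Spec_adjust_line_spacing (text : String) (mode : String) (out : String) : Prop := out = adjust_line_spacing_alt text mode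
instance (text : String) (mode : String) (out : String) : Decidable (Spec_adjust_line_spacing text mode out) := by unfold Spec_adjust_line_spacing; infer_instance

-- ===== CLAIM (what is proved, stated in full; the proofs are below) =====
def Claim_equal_adjust_line_spacing : Prop := ∀ (text : String) (mode : String), Dom_adjust_line_spacing text mode → Spec_adjust_line_spacing text mode (adjust_line_spacing text mode)

-- ===== LEMMAS AND PROOFS =====

-- The separator A appends after a content line (looking ahead) is the one B prepends
-- before the next content line (looking behind): 'sep prev next'.
def pvSep (prev : Option String) (next : Option String) : List String :=
  match prev, next with
  | some p, some n =>
    if PySem.Str.strip n ≠ "" ∧ PySem.Str.strip n ≠ "." ∧ p ≠ "" ∧ p ≠ "." then [""] else []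
  | _, _ => []

lemma pvB_eq_pvA (ls : List String) : ∀ (acc : List String) (prev : Option String),
    (ls.foldl pvB_step (acc, prev)).1 = pvA_cach (acc ++ pvSep prev ls.head?) ls := by
  induction ls with
  | nil => intro acc prev; simp [pvA_cach, pvSep]
  | cons l rest ih =>
    intro acc prev
    simp only [List.foldl_cons, List.head?_cons]
    by_cases h0 : PySem.Str.strip l = ""
    · have hsep : pvSep prev (some l) = [] := by
        cases prev <;> simp [pvSep, h0]
      have hsep2 : pvSep (some (PySem.Str.strip l)) rest.head? = [] := by
        cases rest <;> simp [pvSep, h0]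
      simp only [pvB_step]
      rw [ih, hsep2, hsep]
      simp only [pvA_cach, if_pos h0]
      simp [h0]
    · by_cases h1 : PySem.Str.strip l = "."
      · have hsep : pvSep prev (some l) = [] := by
          cases prev <;> simp [pvSep, h1]
        have hsep2 : pvSep (some (PySem.Str.strip l)) rest.head? = [] := by
          cases rest <;> simp [pvSep, h1]
        simp only [pvB_step]
        rw [ih, hsep2, hsep]
        simp only [pvA_cach, if_neg h0, if_pos h1]
        simp [h1]
      · -- content line
        have hsep : ∀ acc₀ : List String,
            (if PySem.Str.strip l ≠ "" ∧ PySem.Str.strip l ≠ "." ∧ pvPrevContent prev then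
               acc₀ ++ [""] else acc₀) = acc₀ ++ pvSep prev (some l) := by
          intro acc₀
          cases prev with
          | none => simp [pvSep, pvPrevContent]
          | some p =>
            simp only [pvSep, pvPrevContent]
            by_cases hp : p = "" ∨ p = "."
            · rcases hp with hp | hp <;> simp [hp]
            · push_neg at hp
              simp [hp.1, hp.2, h0, h1]
        have hstep : ∀ acc₀ : List String,
            pvA_cach acc₀ (l :: rest) =
              pvA_cach (acc₀ ++ [l] ++ pvSep (some (PySem.Str.strip l)) rest.head?) rest := by
          intro acc₀
          simp only [pvA_cach, if_neg h0, if_neg h1]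
          cases rest with
          | nil => simp [pvSep]
          | cons nxt r =>
            simp only [List.head?_cons, pvSep]
            by_cases hn : PySem.Str.strip nxt ≠ "" ∧ PySem.Str.strip nxt ≠ "."
            · simp [hn, h0, h1]
            · simp [hn, h0, h1]
        simp only [pvB_step]
        rw [hsep, ih, hstep]
        have : (if PySem.Str.strip l = "." ∧ acc ++ pvSep prev (some l) ≠ [] ∧
            PySem.Str.strip (((acc ++ pvSep prev (some l)).getLast?).getD "") ≠ "" then
            acc ++ pvSep prev (some l) ++ ["", ""] else acc ++ pvSep prev (some l))
            = acc ++ pvSep prev (some l) := by simp [h1]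
        rw [this]

-- ===== VERDICT (by name: the statement is the Claim_ definition above) =====
theorem adjust_line_spacing_spec : Claim_equal_adjust_line_spacing := by
  intro text mode _
  unfold Spec_adjust_line_spacing adjust_line_spacing adjust_line_spacing_alt
  by_cases ht : mode = "thu"
  · simp [ht]
  · by_cases hc : mode = "cach"
    · simp only [ht, hc, if_false, if_true, if_neg ht, if_pos hc]
      rw [pvB_eq_pvA]
      have : pvSep none ((PySem.Str.split? text "\n").getD []).head? = [] := by
        cases ((PySem.Str.split? text "\n").getD []).head? <;> simp [pvSep]
      rw [this, List.append_nil]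
    · simp only [if_neg ht, if_neg hc]
      rfl
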